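-- pv_equiv track=rewrite | github.com/rootnegativeone/tightbeam | tests/test_web_simulation_flow.py | _simulate_burst_channel
-- ===== SOURCE A (Python) =====
-- def _simulate_burst_channel(symbols, bursts):
--     """
--     Drop contiguous windows of symbols, modelling a Gilbert-Elliott burst.
--
--     Parameters
--     ----------
--     symbols:
--         Iterable of (indices, payload) pairs from the encoder.
--     bursts:
--         Iterable of (start, length) tuples. Positions refer to symbol order.
--     """
--     drop_ranges = []
--     for start, length in bursts:
--         drop_ranges.append(range(start, start + length))
--
--     delivered = []
--     for idx, symbol in enumerate(symbols):
--         if any(idx in drop_range for drop_range in drop_ranges):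
--             continue
--         delivered.append(symbol)
--     return delivered
-- ===== SOURCE B (Python) =====
-- def _simulate_burst_channel(symbols, bursts):
--     """Sorted sweep: sort burst intervals by start, then scan symbols once,
--     maintaining an interval pointer and the running max end of started intervals."""
--     intervals = sorted(((start, start + length) for start, length in bursts),
--                        key=lambda iv: iv[0])
--     delivered = []
--     i = 0
--     covered = 0
--     for idx, symbol in enumerate(symbols):
--         while i < len(intervals) and intervals[i][0] <= idx:
--             if intervals[i][1] > covered:
--                 covered = intervals[i][1]
--             i += 1
--         if covered <= idx:
--             delivered.append(symbol)
--     return delivered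
-- ===== Notes on version B (the rewrite author's own statement) =====
-- stated objective: faster
-- what changed: Replaced the per-symbol scan of all burst ranges with a single sweep: intervals sorted by start once, then one pass over symbols maintaining an interval pointer and a running max end ('covered') of started intervals.
import Mathlib
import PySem

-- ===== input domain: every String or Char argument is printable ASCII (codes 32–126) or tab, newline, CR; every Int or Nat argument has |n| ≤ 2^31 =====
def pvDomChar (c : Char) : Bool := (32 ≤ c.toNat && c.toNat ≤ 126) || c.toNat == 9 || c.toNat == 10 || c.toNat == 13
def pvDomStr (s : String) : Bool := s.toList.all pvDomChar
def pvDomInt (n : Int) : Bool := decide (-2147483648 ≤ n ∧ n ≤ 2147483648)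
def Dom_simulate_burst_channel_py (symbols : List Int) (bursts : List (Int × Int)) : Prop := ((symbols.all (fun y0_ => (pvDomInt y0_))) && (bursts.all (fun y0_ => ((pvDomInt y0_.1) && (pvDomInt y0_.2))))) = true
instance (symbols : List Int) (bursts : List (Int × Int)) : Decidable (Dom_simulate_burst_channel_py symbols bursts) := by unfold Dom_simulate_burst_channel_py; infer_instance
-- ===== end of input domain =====

-- B changes the algorithm: sort intervals by start once and do a single sweep with a
-- running 'covered' bound, instead of testing every burst range for every symbol (faster).

-- ===== PORT A =====
-- `range(start, start+length)` is represented by its bounds (start, start+length);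
-- `idx in range(s, e)` (step 1) is exactly s ≤ idx ∧ idx < e.
-- the `for idx, symbol in enumerate(symbols)` loop, carrying idx and the delivered accumulator
def pvLoopA (drop_ranges : List (Int × Int)) : List Int → Int → List Int → List Int
  | [], _, delivered => delivered
  | x :: xs, idx, delivered =>
    if drop_ranges.any (fun r => decide (r.1 ≤ idx ∧ idx < r.2)) then
      pvLoopA drop_ranges xs (idx + 1) delivered
    else
      pvLoopA drop_ranges xs (idx + 1) (delivered ++ [x])

def simulate_burst_channel_py (symbols : List Int) (bursts : List (Int × Int)) : List Int :=
  let drop_ranges := bursts.foldl (fun acc b => acc ++ [(b.1, b.1 + b.2)]) []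
  pvLoopA drop_ranges symbols 0 []

-- ===== PORT B =====
-- the inner `while` loop: pop started intervals (start ≤ idx), keeping the max end in covered
def pvAdvance (idx : Int) : List (Int × Int) → Int → List (Int × Int) × Int
  | [], covered => ([], covered)
  | (s, e) :: rest, covered =>
    if s ≤ idx then pvAdvance idx rest (if e > covered then e else covered)
    else ((s, e) :: rest, covered)

-- the main sweep over symbols (the pointer i is the remaining suffix of intervals)
def pvSweep : List Int → Int → List (Int × Int) → Int → List Int
  | [], _, _, _ => []
  | x :: xs, idx, rem, covered =>
    let r := pvAdvance idx rem covered
    if r.2 ≤ idx then x :: pvSweep xs (idx + 1) r.1 r.2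
    else pvSweep xs (idx + 1) r.1 r.2

def simulate_burst_channel_py_alt (symbols : List Int) (bursts : List (Int × Int)) : List Int :=
  let intervals := PySem.List.sorted (bursts.map (fun b => (b.1, b.1 + b.2))) (fun iv => iv.1) false
  pvSweep symbols 0 intervals 0

-- ===== PRECONDITION & SPEC =====
def Spec_simulate_burst_channel_py (symbols : List Int) (bursts : List (Int × Int)) (out : List Int) : Prop := out = simulate_burst_channel_py_alt symbols bursts
instance (symbols : List Int) (bursts : List (Int × Int)) (out : List Int) : Decidable (Spec_simulate_burst_channel_py symbols bursts out) := by unfold Spec_simulate_burst_channel_py; infer_instance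

-- ===== CLAIM (what is proved, stated in full; the proofs are below) =====
def Claim_equal_simulate_burst_channel_py : Prop := ∀ (symbols : List Int) (bursts : List (Int × Int)), Dom_simulate_burst_channel_py symbols bursts → Spec_simulate_burst_channel_py symbols bursts (simulate_burst_channel_py symbols bursts)

-- ===== LEMMAS AND PROOFS =====

-- pvAdvance returns a suffix of its input plus an updated bound, so pairwise order is preserved
lemma pvAdvance_pairwise (idx : Int) (rem : List (Int × Int)) (c : Int)
    (h : rem.Pairwise (fun a b => a.1 ≤ b.1)) :
    (pvAdvance idx rem c).1.Pairwise (fun a b => a.1 ≤ b.1) := by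
  induction rem generalizing c with
  | nil => simp [pvAdvance]
  | cons hd tl ih =>
    obtain ⟨s, e⟩ := hd
    rw [List.pairwise_cons] at h
    by_cases hs : s ≤ idx
    · simpa [pvAdvance, hs] using ih _ h.2
    · simpa [pvAdvance, hs, List.pairwise_cons] using h

-- after pvAdvance, every remaining interval starts strictly after idx
lemma pvAdvance_starts (idx : Int) (rem : List (Int × Int)) (c : Int)
    (h : rem.Pairwise (fun a b => a.1 ≤ b.1)) :
    ∀ iv ∈ (pvAdvance idx rem c).1, idx < iv.1 := by
  induction rem generalizing c with
  | nil => simp [pvAdvance]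
  | cons hd tl ih =>
    obtain ⟨s, e⟩ := hd
    rw [List.pairwise_cons] at h
    by_cases hs : s ≤ idx
    · simpa [pvAdvance, hs] using ih _ h.2
    · intro iv hiv
      simp only [pvAdvance, hs, if_false] at hiv
      rcases List.mem_cons.mp hiv with h1 | h1
      · subst h1; omega
      · have := h.1 iv h1; omega
-- pvAdvance preserves the coverage predicate for every j ≥ idx
lemma pvAdvance_cover (idx j : Int) (rem : List (Int × Int)) (c : Int) (hj : idx ≤ j) :
    (j < (pvAdvance idx rem c).2 ∨ ∃ iv ∈ (pvAdvance idx rem c).1, iv.1 ≤ j ∧ j < iv.2) ↔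
      (j < c ∨ ∃ iv ∈ rem, iv.1 ≤ j ∧ j < iv.2) := by
  induction rem generalizing c with
  | nil => simp [pvAdvance]
  | cons hd tl ih =>
    obtain ⟨s, e⟩ := hd
    by_cases hs : s ≤ idx
    · rw [pvAdvance, if_pos hs, ih]
      constructor
      · rintro (h1 | h1)
        · by_cases he : j < e
          · exact Or.inr ⟨(s, e), by simp, by omega⟩
          · left; split at h1 <;> omega
        · exact Or.inr ⟨h1.choose, List.mem_cons_of_mem _ h1.choose_spec.1, h1.choose_spec.2⟩
      · rintro (h1 | h1)
        · left; split <;> omega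
        · obtain ⟨iv, hmem, hc⟩ := h1
          rcases List.mem_cons.mp hmem with h2 | h2
          · subst h2; left; simp only at hc; split <;> omega
          · exact Or.inr ⟨iv, h2, hc⟩
    · rw [pvAdvance, if_neg hs]

-- the main invariant: the sweep produces exactly what A's per-symbol scan produces
lemma sweep_eq (ivs : List (Int × Int)) (xs : List Int) (idx : Int)
    (rem : List (Int × Int)) (c : Int) (acc : List Int)
    (hrem : rem.Pairwise (fun a b => a.1 ≤ b.1))
    (hinv : ∀ j : Int, idx ≤ j →
      ((j < c ∨ ∃ iv ∈ rem, iv.1 ≤ j ∧ j < iv.2) ↔ ∃ iv ∈ ivs, iv.1 ≤ j ∧ j < iv.2)) :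
    pvLoopA ivs xs idx acc = acc ++ pvSweep xs idx rem c := by
  induction xs generalizing idx rem c acc with
  | nil => simp [pvLoopA, pvSweep]
  | cons x xs ih =>
    have hadvp := pvAdvance_pairwise idx rem c hrem
    have hadvs := pvAdvance_starts idx rem c hrem
    have hinv' : ∀ j : Int, idx ≤ j →
        ((j < (pvAdvance idx rem c).2 ∨ ∃ iv ∈ (pvAdvance idx rem c).1, iv.1 ≤ j ∧ j < iv.2) ↔
          ∃ iv ∈ ivs, iv.1 ≤ j ∧ j < iv.2) := by
      intro j hj; rw [pvAdvance_cover idx j rem c hj]; exact hinv j hj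
    have hdec : (ivs.any (fun r => decide (r.1 ≤ idx ∧ idx < r.2)) = true) ↔
        ¬ (pvAdvance idx rem c).2 ≤ idx := by
      rw [List.any_eq_true]
      constructor
      · intro h
        obtain ⟨r, hr, hc⟩ := h
        have := (hinv' idx le_rfl).mpr ⟨r, hr, by simpa using hc⟩
        rcases this with h1 | ⟨iv, hmem, hcc⟩
        · omega
        · have := hadvs iv hmem; omega
      · intro h
        have := (hinv' idx le_rfl).mp (Or.inl (by omega))
        obtain ⟨iv, hmem, hcc⟩ := this
        exact ⟨iv, hmem, by simpa using hcc⟩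
    have hinv'' : ∀ j : Int, idx + 1 ≤ j →
        ((j < (pvAdvance idx rem c).2 ∨ ∃ iv ∈ (pvAdvance idx rem c).1, iv.1 ≤ j ∧ j < iv.2) ↔
          ∃ iv ∈ ivs, iv.1 ≤ j ∧ j < iv.2) := fun j hj => hinv' j (by omega)
    rw [pvLoopA, pvSweep]
    by_cases hcond : (pvAdvance idx rem c).2 ≤ idx
    · have hA : ivs.any (fun r => decide (r.1 ≤ idx ∧ idx < r.2)) = false := by
        rw [← Bool.not_eq_true]; intro h; exact (hdec.mp h) hcond
      simp only [hA, Bool.false_eq_true, if_false, hcond, if_pos]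
      rw [ih (idx + 1) _ _ _ hadvp hinv'']
      simp
    · have hA : ivs.any (fun r => decide (r.1 ≤ idx ∧ idx < r.2)) = true := hdec.mpr hcond
      simp only [hA, if_pos, hcond, if_false]
      exact ih (idx + 1) _ _ _ hadvp hinv''

-- ===== VERDICT (by name: the statement is the Claim_ definition above) =====
theorem simulate_burst_channel_py_spec : Claim_equal_simulate_burst_channel_py := by
  intro symbols bursts _
  unfold Spec_simulate_burst_channel_py simulate_burst_channel_py simulate_burst_channel_py_alt
  simp only [PySem.List.foldl_append_singleton_eq_map]
  set ivs := bursts.map (fun b => (b.1, b.1 + b.2)) with hivs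
  have hpair : (PySem.List.sorted ivs (fun iv => iv.1) false).Pairwise (fun a b => a.1 ≤ b.1) :=
    PySem.List.sorted_pairwise ivs (fun iv => iv.1)
  have hinv : ∀ j : Int, (0 : Int) ≤ j →
      ((j < 0 ∨ ∃ iv ∈ PySem.List.sorted ivs (fun iv => iv.1) false, iv.1 ≤ j ∧ j < iv.2) ↔
        ∃ iv ∈ ivs, iv.1 ≤ j ∧ j < iv.2) := by
    intro j hj
    constructor
    · rintro (h | ⟨iv, hmem, hc⟩)
      · omega
      · exact ⟨iv, (PySem.List.mem_sorted _ _ _ _).mp hmem, hc⟩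
    · rintro ⟨iv, hmem, hc⟩
      exact Or.inr ⟨iv, (PySem.List.mem_sorted _ _ _ _).mpr hmem, hc⟩
  simpa using sweep_eq ivs symbols 0 _ 0 [] hpair hinv
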